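-- pv_equiv track=rewrite | github.com/udisinghania/University-CodeSprint-4-solutions | max permutation/mp.py | maximumPermutation
-- ===== SOURCE A (Python) =====
-- def maximumPermutation(w, s):
--     # Return the string representing the answer.
--     r=list(w)
--     t=list(s)
--     f=0
--     for i in range (len(r)):
--         if r.count(r[i])<=t.count(r[i]):
--             f=f+1
--     if f!=len(r):
--         return '-1';
--     else:
--
--         return w;
-- ===== SOURCE B (Python) =====
-- def maximumPermutation(w, s):
--     # Consume a pool: remove one occurrence of each char of w from a copy of s.
--     pool = list(s)
--     for c in w:
--         if c in pool:
--             pool.remove(c)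
--         else:
--             return '-1'
--     return w
-- ===== Notes on version B (the rewrite author's own statement) =====
-- stated objective: alternative
-- what changed: Replaces A's per-position loop, which fully re-counts the current character in both w and s at every index, with a pool-consumption algorithm: copy s into a pool, remove one occurrence of each character of w, and fail at the first impossible removal; no frequency counts are computed at all.
import Mathlib
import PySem

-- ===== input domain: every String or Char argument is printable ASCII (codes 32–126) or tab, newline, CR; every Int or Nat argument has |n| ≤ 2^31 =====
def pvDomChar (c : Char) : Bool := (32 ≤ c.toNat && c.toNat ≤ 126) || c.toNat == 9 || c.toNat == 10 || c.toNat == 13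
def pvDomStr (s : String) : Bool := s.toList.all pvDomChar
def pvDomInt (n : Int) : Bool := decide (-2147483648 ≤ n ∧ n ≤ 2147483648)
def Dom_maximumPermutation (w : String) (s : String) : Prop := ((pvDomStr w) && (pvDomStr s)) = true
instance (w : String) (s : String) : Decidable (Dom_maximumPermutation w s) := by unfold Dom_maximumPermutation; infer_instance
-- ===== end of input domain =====

-- B replaces A's per-position count comparisons by consuming a pool: remove one occurrence
-- of each char of w from a copy of s, failing on the first impossible removal (alternative).

-- ===== PORT A =====
def maximumPermutation (w : String) (s : String) : String :=
  let r := w.toList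
  let t := s.toList
  let f : Int := (PySem.List.pyRange 0 (r.length : Int) 1).foldl
    (fun f i =>
      if PySem.List.count r (PySem.List.pyGetD r i ' ') ≤ PySem.List.count t (PySem.List.pyGetD r i ' ')
      then f + 1 else f) 0
  if f ≠ (r.length : Int) then "-1" else w

-- ===== PORT B =====
-- the loop of Source B: remove each char of w from the pool, early-return false on failure
def mpConsume : List Char → List Char → Bool
  | [], _ => true
  | c :: ws, pool => if c ∈ pool then mpConsume ws (pool.erase c) else false

def maximumPermutation_alt (w : String) (s : String) : String :=
  if mpConsume w.toList s.toList then w else "-1"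

-- ===== PRECONDITION & SPEC =====
def Spec_maximumPermutation (w : String) (s : String) (out : String) : Prop := out = maximumPermutation_alt w s
instance (w : String) (s : String) (out : String) : Decidable (Spec_maximumPermutation w s out) := by unfold Spec_maximumPermutation; infer_instance

-- ===== CLAIM (what is proved, stated in full; the proofs are below) =====
def Claim_equal_maximumPermutation : Prop := ∀ (w : String) (s : String), Dom_maximumPermutation w s → Spec_maximumPermutation w s (maximumPermutation w s)

-- ===== LEMMAS AND PROOFS =====

-- A's loop counts the positions whose char has enough copies in s; it reduces to the
-- predicate "every char of w occurs in s at least as often as in w".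
lemma mp_a_eq (w s : String) :
    maximumPermutation w s =
      (if ∀ c ∈ w.toList, w.toList.count c ≤ s.toList.count c then w else "-1") := by
  show (if (PySem.List.pyRange 0 (w.toList.length : Int) 1).foldl
      (fun f i =>
        if PySem.List.count w.toList (PySem.List.pyGetD w.toList i ' ') ≤
            PySem.List.count s.toList (PySem.List.pyGetD w.toList i ' ')
        then f + 1 else f) 0 ≠ (w.toList.length : Int) then "-1" else w) = _
  rw [PySem.List.foldl_pyRange_zero_pyGetD' w.toList ' '
    (fun f c => if PySem.List.count w.toList c ≤ PySem.List.count s.toList c then f + 1 else f) 0]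
  rw [PySem.List.foldl_ite_add_one (fun c => PySem.List.count w.toList c ≤ PySem.List.count s.toList c)]
  by_cases h : ∀ c ∈ w.toList, w.toList.count c ≤ s.toList.count c
  · have hc : w.toList.countP
        (fun c => decide (PySem.List.count w.toList c ≤ PySem.List.count s.toList c)) = w.toList.length :=
      List.countP_eq_length.mpr (fun a ha => by simpa using h a ha)
    simp [PySem.List.count_eq] at hc
    simp [hc]
    intro x hx hlt
    exact absurd hlt (not_lt.mpr (h x hx))
  · have hc : w.toList.countP
        (fun c => decide (PySem.List.count w.toList c ≤ PySem.List.count s.toList c)) ≠ w.toList.length :=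
      fun he => h (by simpa using List.countP_eq_length.mp he)
    simp [PySem.List.count_eq] at hc
    simp [h]
    intro he
    exact absurd he hc

-- B's pool consumption succeeds iff every char is needed no more often than it is available.
lemma mpConsume_iff (w : List Char) : ∀ pool : List Char,
    mpConsume w pool = true ↔ ∀ d : Char, w.count d ≤ pool.count d := by
  induction w with
  | nil => intro pool; simp [mpConsume]
  | cons c ws ih =>
    intro pool
    simp only [mpConsume]
    by_cases hm : c ∈ pool
    · rw [if_pos hm, ih]
      have hcp : 1 ≤ pool.count c := List.one_le_count_iff.mpr hm
      constructor
      · intro h d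
        have hd := h d
        rw [List.count_erase] at hd
        simp only [List.count_cons, beq_iff_eq] at hd ⊢
        by_cases hdc : d = c
        · subst hdc; simp at hd ⊢; omega
        · simp [Ne.symm hdc] at hd ⊢; omega
      · intro h d
        have hd := h d
        rw [List.count_erase]
        simp only [List.count_cons, beq_iff_eq] at hd ⊢
        by_cases hdc : d = c
        · subst hdc; simp at hd ⊢; omega
        · simp [Ne.symm hdc] at hd ⊢; omega
    · rw [if_neg hm]
      constructor
      · intro h; exact absurd h (by simp)
      · intro h
        have h0 : pool.count c = 0 := List.count_eq_zero.mpr hm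
        have hc := h c
        rw [h0, List.count_cons_self] at hc
        omega

lemma mp_b_eq (w s : String) :
    maximumPermutation_alt w s =
      (if ∀ c ∈ w.toList, w.toList.count c ≤ s.toList.count c then w else "-1") := by
  unfold maximumPermutation_alt
  congr 1
  simp only [eq_iff_iff, mpConsume_iff w.toList s.toList]
  constructor
  · intro h c _; exact h c
  · intro h d
    by_cases hd : d ∈ w.toList
    · exact h d hd
    · simp [List.count_eq_zero.mpr hd]

-- ===== VERDICT (by name: the statement is the Claim_ definition above) =====
theorem maximumPermutation_spec : Claim_equal_maximumPermutation := by
  intro w s _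
  unfold Spec_maximumPermutation
  rw [mp_a_eq, mp_b_eq]
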